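-- pv_equiv track=rewrite | github.com/PR713/university-courses | WDI/53.singletony.py | zad6
-- ===== SOURCE A (Python) =====
-- def is_singleton(num,T): #num i T to tablica T2
--     n = len(T)
--     flag = False
--     for i in range(n):
--         for j in range(n):
--             if(T[i][j] == num and not flag): flag = True #not flag to inaczej flag == False
--             elif(T[i][j] == num and flag): return False
--     return True
--
-- def push(T,num,i): #przepychanie
--     n = len(T)
--     temp = T[i]
--     T[i] = num
--     for j in range(i, n-1):
--         T[j+1], temp = temp, T[j+1]
--
-- def pseudosort(T,num):
--     n = len(T)
--     i = 0
--     while T[i] < num: #znajduje na którym indeksie umieścić kolejną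
--         if T[i] == 0:
--             T[i] = num
--             return
--         i+=1
--     if i == n-1:
--        T[i] = num
--     else:
--         push(T,num,i)
--
-- def zad6(T1):
--     n = len(T1)
--     T2 = [0 for _ in range(n*n)]
--     for i in range(n):
--         for j in range(n):
--             if is_singleton(T1[i][j], T1):
--                 pseudosort(T2,T1[i][j])
--     return T2
-- ===== SOURCE B (Python) =====
-- def zad6(T1):
--     n = len(T1)
--     flat = sorted(row[j] for row in T1 for j in range(n))
--     vals = []
--     i = 0
--     while i < len(flat):
--         j = i + 1
--         while j < len(flat) and flat[j] == flat[i]: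
--             j += 1
--         if j == i + 1 and flat[i] != 0:
--             vals.append(flat[i])
--         i = j
--     return vals + [0] * (n * n - len(vals))
-- ===== Notes on version B (the rewrite author's own statement) =====
-- stated objective: faster
-- what changed: A tests each cell for uniqueness with a full quadratic matrix scan and inserts it into the output by a hand-rolled shifting insertion sort; B flattens the n*n cells once, sorts them, and collects singletons in one pass over the sorted list as runs of length one, then pads with zeros.
-- intended difference: When 0 occurs exactly once in the n x n cells and some positive value that is also unique precedes that 0 in row-major order, A's pseudosort misplaces later insertions (e.g. [[1,0],[2,3]] -> [2,1,3,0], an unsorted array); B returns the unique nonzero values in ascending order followed by zeros ([1,2,3,0]), which is the intended sorted output. — e.g. on zad6([[1, 0], [2, 3]]): A returns [2, 1, 3, 0], B returns [1, 2, 3, 0]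
import Mathlib
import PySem

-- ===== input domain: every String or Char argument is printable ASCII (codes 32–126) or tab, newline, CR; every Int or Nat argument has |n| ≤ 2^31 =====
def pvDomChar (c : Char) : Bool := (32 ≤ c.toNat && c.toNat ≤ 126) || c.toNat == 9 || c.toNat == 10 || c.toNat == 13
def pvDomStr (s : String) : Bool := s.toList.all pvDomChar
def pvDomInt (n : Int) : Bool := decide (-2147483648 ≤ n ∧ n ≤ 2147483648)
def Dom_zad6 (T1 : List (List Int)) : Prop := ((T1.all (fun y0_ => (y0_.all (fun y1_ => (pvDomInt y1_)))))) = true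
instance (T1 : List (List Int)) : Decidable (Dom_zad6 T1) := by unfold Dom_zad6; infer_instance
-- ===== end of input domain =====

-- B replaces A's per-cell quadratic uniqueness scan + hand-rolled shifting insertion
-- ("pseudosort") by flatten-sort-then-one-pass run detection; on the corner in D_zad6
-- (a unique 0 preceded row-major by a unique positive) A's insertion misplaces values
-- and B returns the intended sorted result.

-- the row-major list of the n*n cells T1[i][j], i,j < n = len(T1) (getD is exact
-- on Pre_: all indices in range)
def pvFlat (T1 : List (List Int)) : List Int :=
  T1.flatMap (fun row => (List.range T1.length).map (fun j => row.getD j 0))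

-- ===== PORT A =====
-- is_singleton: nested i/j loops with a flag and an early `return False`, flattened
-- to one structural recursion over the (i,j) grid.  Indexing T[i][j] is in range for
-- every input admitted by Pre_zad6, so `getD` is exact there.
def pvSingGo (num : Int) (T : List (List Int)) : List (Nat × Nat) → Bool → Bool
  | [], _ => true
  | (i, j) :: rest, flag =>
    if (T.getD i []).getD j 0 == num && !flag then pvSingGo num T rest true
    else if (T.getD i []).getD j 0 == num && flag then false
    else pvSingGo num T rest flag

def pvIsSingleton (num : Int) (T : List (List Int)) : Bool :=
  pvSingGo num T ((List.range T.length).flatMap (fun i => (List.range T.length).map (fun j => (i, j)))) false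

-- push: the for-j shifting loop, state = (current list, temp)
def pvPush (T : List Int) (num : Int) (i : Nat) : List Int :=
  ((List.range' i (T.length - 1 - i)).foldl
    (fun (s : List Int × Int) j => (s.1.set (j + 1) s.2, s.1.getD (j + 1) 0))
    (T.set i num, T.getD i 0)).1

-- pseudosort: the while-loop, index i increasing; `fuel` (= T.length - i at every
-- call) is only the structural totality guard; the `else T` / fuel-0 branches are
-- unreachable for the states zad6 builds (Python would raise IndexError there).
def pvPseudoGo (T : List Int) (num : Int) : Nat → Nat → List Int
  | _, 0 => T
  | i, fuel + 1 =>
    if i < T.length then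
      if T.getD i 0 < num then
        if T.getD i 0 == 0 then T.set i num
        else pvPseudoGo T num (i + 1) fuel
      else if i == T.length - 1 then T.set i num
      else pvPush T num i
    else T

def zad6 (T1 : List (List Int)) : List Int :=
  let n := T1.length
  (List.range n).foldl
    (fun acc i =>
      (List.range n).foldl
        (fun acc2 j =>
          if pvIsSingleton ((T1.getD i []).getD j 0) T1 then
            pvPseudoGo acc2 ((T1.getD i []).getD j 0) 0 acc2.length
          else acc2)
        acc)
    (List.replicate (n * n) 0)

-- ===== PORT B =====
-- the outer while-loop of Source B: one pass over the sorted list; the inner while-loop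
-- that skips a run of equal values is takeWhile/dropWhile of that run.
def pvCollectGo : Nat → List Int → List Int
  | _, [] => []
  | 0, _ :: _ => []
  | fuel + 1, x :: xs =>
    if xs.takeWhile (fun y => y == x) = [] then
      (if x == 0 then pvCollectGo fuel (xs.dropWhile (fun y => y == x))
       else x :: pvCollectGo fuel (xs.dropWhile (fun y => y == x)))
    else pvCollectGo fuel (xs.dropWhile (fun y => y == x))

def pvCollect (l : List Int) : List Int := pvCollectGo l.length l

def zad6_alt (T1 : List (List Int)) : List Int :=
  let n := T1.length
  let flat := PySem.List.sorted (pvFlat T1) (fun x => x) false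
  let vals := pvCollect flat
  vals ++ List.replicate (n * n - vals.length) 0

-- ===== PRECONDITION & SPEC =====
-- Pre_ excludes exactly the inputs where A raises IndexError: some of the first n rows
-- shorter than n = len(T1) (A indexes T1[i][j] for all i, j < n).
def Pre_zad6 (T1 : List (List Int)) : Prop := ∀ row ∈ T1, T1.length ≤ row.length
instance (T1 : List (List Int)) : Decidable (Pre_zad6 T1) := by unfold Pre_zad6; infer_instance

def pvWitness_zad6 : List (List Int) := [[1, 2], [3, 4]]

-- When 0 occurs exactly once among the n×n cells and some positive value that is also
-- unique precedes that 0 in row-major order, A's pseudosort misplaces later insertions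
-- (it parks the 0 in front of the positives and later overwrites it out of order),
-- returning an array that is not sorted; B returns the unique nonzero values in
-- ascending order followed by zeros, the intended output.
def D_zad6 (T1 : List (List Int)) : Prop :=
  let F := T1.flatMap (fun row => (List.range T1.length).map (fun j => row.getD j 0))
  F.count 0 = 1 ∧ ∃ v ∈ F.take (F.idxOf 0), 0 < v ∧ F.count v = 1
instance (T1 : List (List Int)) : Decidable (D_zad6 T1) := by unfold D_zad6; infer_instance

def Spec_zad6 (T1 : List (List Int)) (out : List Int) : Prop := ¬ D_zad6 T1 → out = zad6_alt T1
instance (T1 : List (List Int)) (out : List Int) : Decidable (Spec_zad6 T1 out) := by unfold Spec_zad6; infer_instance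

def pvDiffWitness_zad6 : List (List Int) := [[1, 0], [2, 3]]
def pvDiffWitnessOut_zad6 : (List Int) × (List Int) := ([2, 1, 3, 0], [1, 2, 3, 0])

-- ===== CLAIM (what is proved, stated in full; the proofs are below) =====
def Claim_unchanged_zad6 : Prop := ∀ (T1 : List (List Int)), Dom_zad6 T1 → Pre_zad6 T1 → Spec_zad6 T1 (zad6 T1)
def Claim_changed_zad6 : Prop := Dom_zad6 (pvDiffWitness_zad6) ∧ Pre_zad6 (pvDiffWitness_zad6) ∧ D_zad6 (pvDiffWitness_zad6) ∧ zad6 (pvDiffWitness_zad6) = pvDiffWitnessOut_zad6.1 ∧ zad6_alt (pvDiffWitness_zad6) = pvDiffWitnessOut_zad6.2 ∧ pvDiffWitnessOut_zad6.1 ≠ pvDiffWitnessOut_zad6.2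

-- ===== LEMMAS AND PROOFS =====


-- general list helpers -------------------------------------------------------

lemma dropWhile_head_false {p : Int → Bool} :
    ∀ {l : List Int} {y : Int} {ys : List Int}, l.dropWhile p = y :: ys → p y = false := by
  intro l
  induction l with
  | nil => intro y ys h; simp [List.dropWhile] at h
  | cons a t ih =>
    intro y ys h
    by_cases hp : p a
    · rw [List.dropWhile_cons_of_pos hp] at h; exact ih h
    · rw [List.dropWhile_cons_of_neg hp] at h
      cases h
      simpa using hp

lemma count_filter_eq (l : List Int) (q : Int → Bool) (a : Int) :
    (l.filter q).count a = if q a then l.count a else 0 := by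
  induction l with
  | nil => simp
  | cons x t ih =>
    by_cases hx : x = a
    · subst hx
      by_cases hq : q x
      · simp [List.filter_cons, hq, List.count_cons, ih]
      · simp [List.filter_cons, hq, List.count_cons, ih]
    · by_cases hq : q x
      · simp [List.filter_cons, hq, List.count_cons, hx, ih]
      · simp [List.filter_cons, hq, List.count_cons, hx, ih]

lemma not_mem_take_idxOf (l : List Int) (a : Int) : a ∉ l.take (l.idxOf a) := by
  induction l with
  | nil => simp
  | cons x t ih =>
    by_cases hx : x = a
    · subst hx; simp [List.idxOf_cons_self]
    · rw [List.idxOf_cons_ne _ (by simpa using hx)]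
      simp only [List.take_succ_cons, List.mem_cons, not_or]
      exact ⟨fun h => hx h.symm, ih⟩

lemma map_getD_range (l : List (List Int)) :
    (List.range l.length).map (fun i => l.getD i []) = l := by
  apply List.ext_getElem
  · simp
  · intro i h1 h2
    simp [List.getD_eq_getElem?_getD, List.getElem?_eq_getElem h2]

lemma flatMap_eq_range (l : List (List Int)) (f : List Int → List Int) :
    l.flatMap f = (List.range l.length).flatMap (fun i => f (l.getD i [])) := by
  conv_lhs => rw [← map_getD_range l]
  rw [List.flatMap_def, List.map_map, ← List.flatMap_def]
  rfl

lemma getD_append_len : ∀ (P u : List Int) (d : Int), (P ++ u).getD P.length d = u.getD 0 d := by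
  intro P
  induction P with
  | nil => intro u d; rfl
  | cons a P ih => intro u d; simpa using ih u d

lemma getD_append_len' (P u : List Int) (d : Int) (n : Nat) (h : n = P.length) :
    (P ++ u).getD n d = u.getD 0 d := by
  subst h; exact getD_append_len P u d

-- push ------------------------------------------------------------------------

lemma push_aux (T : List Int) (num : Int) (i : Nat) :
    ∀ k, i + k < T.length →
      (List.range' i k).foldl
          (fun (s : List Int × Int) j => (s.1.set (j + 1) s.2, s.1.getD (j + 1) 0))
          (T.set i num, T.getD i 0)
        = (T.take i ++ num :: (T.drop i).take k ++ T.drop (i + k + 1), T.getD (i + k) 0) := by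
  intro k
  induction k with
  | zero =>
    intro h
    simp only [List.range'_zero, List.foldl_nil, List.take_zero, Nat.add_zero]
    rw [List.set_eq_take_cons_drop num (by omega)]
    simp
  | succ k ih =>
    intro h
    rw [List.range'_1_concat, List.foldl_append, ih (by omega), List.foldl_cons, List.foldl_nil]
    have hpre : (T.take i ++ num :: (T.drop i).take k).length = i + 1 + k := by
      simp [List.length_take, List.length_drop]
      omega
    have hassoc : T.take i ++ num :: (T.drop i).take k ++ T.drop (i + k + 1)
        = (T.take i ++ num :: (T.drop i).take k) ++ T.drop (i + k + 1) := by
      simp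
    have hdropc : T.drop (i + k + 1) = T[i + k + 1] :: T.drop (i + k + 2) := by
      rw [List.drop_eq_getElem_cons (by omega)]
    have hset : (T.take i ++ num :: (T.drop i).take k ++ T.drop (i + k + 1)).set (i + k + 1)
          (T.getD (i + k) 0)
        = T.take i ++ num :: (T.drop i).take (k + 1) ++ T.drop (i + k + 2) := by
      rw [hassoc, List.set_append, if_neg (by omega)]
      have h0 : i + k + 1 - (T.take i ++ num :: (T.drop i).take k).length = 0 := by omega
      rw [h0, hdropc, List.set_cons_zero]
      have htake : (T.drop i).take (k + 1) = (T.drop i).take k ++ [(T.drop i)[k]'(by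
            simp [List.length_drop]; omega)] := by
        exact List.take_succ_eq_append_getElem (by simp [List.length_drop]; omega)
      have hgd : T.getD (i + k) 0 = (T.drop i)[k]'(by simp [List.length_drop]; omega) := by
        rw [List.getD_eq_getElem _ _ (by omega)]
        simp
      rw [htake, hgd]
      simp
    have hget : (T.take i ++ num :: (T.drop i).take k ++ T.drop (i + k + 1)).getD (i + k + 1) 0
        = T.getD (i + k + 1) 0 := by
      rw [hassoc, getD_append_len' _ _ _ _ (by omega), hdropc, List.getD_cons_zero]
      rw [List.getD_eq_getElem _ _ (by omega)]
    rw [hset, hget]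
    have h1 : i + (k + 1) + 1 = i + k + 2 := by omega
    have h2 : i + (k + 1) = i + k + 1 := by omega
    rw [h1, h2]

lemma push_spec (T : List Int) (num : Int) (i : Nat) (h : i < T.length) :
    pvPush T num i = T.take i ++ num :: (T.drop i).dropLast := by
  unfold pvPush
  rw [push_aux T num i (T.length - 1 - i) (by omega)]
  have hdrop : T.drop (i + (T.length - 1 - i) + 1) = [] := by
    apply List.drop_eq_nil_of_le; omega
  rw [hdrop, List.dropLast_eq_take, List.append_nil]
  have h2 : (T.drop i).length - 1 = T.length - 1 - i := by rw [List.length_drop]; omega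
  rw [h2]

-- pseudosort ------------------------------------------------------------------

lemma pseudo_spec :
    ∀ (L P : List Int) (z : Nat) (num : Int), 1 ≤ z →
      (∀ x ∈ L, x < num → x ≠ 0) →
      pvPseudoGo (P ++ (L ++ List.replicate z 0)) num P.length (L.length + z)
        = P ++ (L.takeWhile (fun x => decide (x < num)) ++
            num :: L.dropWhile (fun x => decide (x < num)) ++ List.replicate (z - 1) 0) := by
  intro L
  induction L with
  | nil =>
    intro P z num hz hL
    obtain ⟨z', rfl⟩ : ∃ z', z = z' + 1 := ⟨z - 1, by omega⟩
    simp only [List.nil_append, List.length_nil, Nat.zero_add, List.takeWhile_nil,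
      List.dropWhile_nil, Nat.add_sub_cancel]
    have hT : (P ++ List.replicate (z' + 1) (0:Int)).length = P.length + (z' + 1) := by simp
    have hget : (P ++ List.replicate (z' + 1) (0:Int)).getD P.length 0 = 0 := by
      rw [getD_append_len]
      simp [List.replicate_succ]
    have hsetz : (P ++ List.replicate (z' + 1) (0:Int)).set P.length num
        = P ++ num :: List.replicate z' 0 := by
      rw [List.set_append, if_neg (by omega), Nat.sub_self, List.replicate_succ,
        List.set_cons_zero]
    simp only [pvPseudoGo, hget, hT]
    rw [if_pos (by omega)]
    by_cases hpos : (0:Int) < num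
    · rw [if_pos hpos, if_pos (by simp)]
      exact hsetz
    · rw [if_neg hpos]
      cases z' with
      | zero =>
        rw [if_pos (by simp)]
        exact hsetz
      | succ w =>
        rw [if_neg (by simp only [beq_iff_eq]; omega)]
        rw [push_spec _ _ _ (by omega)]
        rw [List.take_left, List.drop_left]
        have hdl : (List.replicate (w + 1 + 1) (0:Int)).dropLast = List.replicate (w + 1) 0 := by
          rw [List.dropLast_replicate]
          norm_num
        rw [hdl]
        simp
  | cons x L' ih =>
    intro P z num hz hL
    have hf : (x :: L').length + z = (L'.length + z) + 1 := by simp; omega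
    rw [hf]
    have hT : (P ++ (x :: L' ++ List.replicate z (0:Int))).length
        = P.length + (L'.length + 1 + z) := by simp; omega
    have hget : (P ++ (x :: L' ++ List.replicate z (0:Int))).getD P.length 0 = x := by
      rw [getD_append_len]
      rfl
    simp only [pvPseudoGo, hget, hT]
    rw [if_pos (by omega)]
    by_cases hx : x < num
    · have hx0 : x ≠ 0 := hL x List.mem_cons_self hx
      rw [if_pos hx, if_neg (by simpa using hx0)]
      have hre : P ++ (x :: L' ++ List.replicate z (0:Int))
          = (P ++ [x]) ++ (L' ++ List.replicate z 0) := by simp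
      have hlen1 : P.length + 1 = (P ++ [x]).length := by simp
      rw [hre, hlen1, ih (P ++ [x]) z num hz (fun y hy => hL y (List.mem_cons_of_mem x hy))]
      rw [List.takeWhile_cons_of_pos (by simpa using hx),
        List.dropWhile_cons_of_pos (by simpa using hx)]
      simp
    · rw [if_neg hx, if_neg (by simp only [beq_iff_eq]; omega)]
      rw [push_spec _ _ _ (by omega)]
      rw [List.take_left, List.drop_left]
      obtain ⟨w, rfl⟩ : ∃ w, z = w + 1 := ⟨z - 1, by omega⟩
      have hdl : (x :: L' ++ List.replicate (w + 1) (0:Int)).dropLast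
          = x :: L' ++ List.replicate w 0 := by
        have h1 : x :: L' ++ List.replicate (w + 1) (0:Int)
            = (x :: L') ++ List.replicate (w + 1) 0 := by simp
        rw [h1, List.dropLast_append_of_ne_nil (by simp), List.dropLast_replicate]
        simp
      rw [hdl]
      rw [List.takeWhile_cons_of_neg (by simpa using hx),
        List.dropWhile_cons_of_neg (by simpa using hx)]
      simp

-- is_singleton ----------------------------------------------------------------

lemma singGo_spec (num : Int) (T : List (List Int)) :
    ∀ (ps : List (Nat × Nat)) (flag : Bool),
      pvSingGo num T ps flag
        = decide ((ps.map (fun p => (T.getD p.1 []).getD p.2 0)).count num + (cond flag 1 0) ≤ 1) := by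
  intro ps
  induction ps with
  | nil => intro flag; cases flag <;> simp [pvSingGo]
  | cons p rest ih =>
    intro flag
    obtain ⟨i, j⟩ := p
    simp only [pvSingGo, List.map_cons, List.count_cons]
    by_cases hx : (T.getD i []).getD j 0 = num
    · have hxb : ((T.getD i []).getD j 0 == num) = true := by simpa using hx
      rw [hxb]
      cases flag
      · rw [if_pos (by simp), ih true, decide_eq_decide]
        simp only [if_true, Bool.cond_true, Bool.cond_false]
      · rw [if_neg (by simp), if_pos (by simp)]
        symm
        rw [decide_eq_false_iff_not]
        simp only [if_true, Bool.cond_true]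
        omega
    · have hxb : ((T.getD i []).getD j 0 == num) = false := by simpa using hx
      rw [hxb]
      rw [if_neg (by simp), if_neg (by simp), ih flag, decide_eq_decide]
      cases flag
      · simp only [Bool.cond_false, if_neg (show ¬ (false = true) by simp)]
      · simp only [Bool.cond_true, if_neg (show ¬ (false = true) by simp)]

lemma isSingleton_eq (T1 : List (List Int)) (v : Int) :
    pvIsSingleton v T1 = decide ((pvFlat T1).count v ≤ 1) := by
  unfold pvIsSingleton
  rw [singGo_spec]
  have hmap : (((List.range T1.length).flatMap
        (fun i => (List.range T1.length).map (fun j => (i, j)))).map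
          (fun p => (T1.getD p.1 []).getD p.2 0))
      = (List.range T1.length).flatMap
          (fun i => (List.range T1.length).map (fun j => (T1.getD i []).getD j 0)) := by
    rw [List.map_flatMap]
    congr 1
    funext i
    rw [List.map_map]
    rfl
  have hFr : (List.range T1.length).flatMap
      (fun i => (List.range T1.length).map (fun j => (T1.getD i []).getD j 0)) = pvFlat T1 := by
    unfold pvFlat
    exact (flatMap_eq_range T1
      (fun row => (List.range T1.length).map (fun j => row.getD j 0))).symm
  rw [hmap, hFr]
  simp

-- A-side reduction ------------------------------------------------------------

lemma zad6_eq_chain (T1 : List (List Int)) :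
    zad6 T1 = ((pvFlat T1).filter (fun v => decide ((pvFlat T1).count v = 1))).foldl
        (fun st v => pvPseudoGo st v 0 st.length)
        (List.replicate (T1.length * T1.length) 0) := by
  unfold zad6
  simp only []
  have h1 : ∀ (init : List Int),
      (List.range T1.length).foldl
        (fun acc i => (List.range T1.length).foldl
          (fun acc2 j => if pvIsSingleton ((T1.getD i []).getD j 0) T1 then
              pvPseudoGo acc2 ((T1.getD i []).getD j 0) 0 acc2.length else acc2) acc)
        init
      = ((List.range T1.length).flatMap
          (fun i => (List.range T1.length).map (fun j => (T1.getD i []).getD j 0))).foldl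
          (fun acc2 v => if pvIsSingleton v T1 then pvPseudoGo acc2 v 0 acc2.length else acc2)
          init := by
    intro init
    rw [List.flatMap_def, List.foldl_flatten, List.foldl_map]
    apply PySem.List.foldl_congr_mem
    intro acc i _
    rw [List.foldl_map]
  have hFr : (List.range T1.length).flatMap
      (fun i => (List.range T1.length).map (fun j => (T1.getD i []).getD j 0)) = pvFlat T1 := by
    unfold pvFlat
    exact (flatMap_eq_range T1
      (fun row => (List.range T1.length).map (fun j => row.getD j 0))).symm
  rw [h1, hFr]
  have h2 : (pvFlat T1).foldl
      (fun acc2 v => if pvIsSingleton v T1 then pvPseudoGo acc2 v 0 acc2.length else acc2)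
      (List.replicate (T1.length * T1.length) 0)
    = (pvFlat T1).foldl
      (fun acc2 v => if decide ((pvFlat T1).count v = 1) then
          pvPseudoGo acc2 v 0 acc2.length else acc2)
      (List.replicate (T1.length * T1.length) 0) := by
    apply PySem.List.foldl_congr_mem
    intro acc v hv
    have hc : 1 ≤ (pvFlat T1).count v := List.one_le_count_iff.mpr hv
    rw [isSingleton_eq]
    have hd : decide ((pvFlat T1).count v ≤ 1) = decide ((pvFlat T1).count v = 1) := by
      rw [decide_eq_decide]; omega
    rw [hd]
  rw [h2, PySem.List.foldl_if_eq_foldl_filter]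

-- collect (B-side) ------------------------------------------------------------

lemma collectGo_spec :
    ∀ (fuel : Nat) (l : List Int), l.length ≤ fuel → l.Pairwise (· ≤ ·) →
      pvCollectGo fuel l = l.filter (fun v => decide (l.count v = 1) && !(v == 0)) := by
  intro fuel
  induction fuel with
  | zero =>
    intro l hl _
    cases l with
    | nil => rfl
    | cons x xs => simp at hl
  | succ fuel ih =>
    intro l hl hsorted
    cases l with
    | nil => rfl
    | cons x xs =>
      have hsx : ∀ y ∈ xs, x ≤ y := (List.pairwise_cons.mp hsorted).1
      have hxs' : xs.Pairwise (· ≤ ·) := (List.pairwise_cons.mp hsorted).2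
      have hxs : xs.takeWhile (fun y => y == x) ++ xs.dropWhile (fun y => y == x) = xs :=
        List.takeWhile_append_dropWhile
      have hrx : ∀ y ∈ xs.takeWhile (fun y => y == x), y = x := by
        intro y hy
        have := List.mem_takeWhile_imp hy
        simpa using this
      have htt : (xs.dropWhile (fun y => y == x)).Pairwise (· ≤ ·) :=
        hxs'.sublist (List.dropWhile_sublist _)
      have hxt : ∀ y ∈ xs.dropWhile (fun y => y == x), x < y := by
        cases ht0 : xs.dropWhile (fun y => y == x) with
        | nil => simp
        | cons t0 t' =>
          have h0 : (t0 == x) = false := dropWhile_head_false (p := fun y => y == x) ht0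
          have ht0x : t0 ≠ x := by simpa using h0
          have ht0mem : t0 ∈ xs :=
            (List.dropWhile_sublist _).subset (ht0 ▸ List.mem_cons_self)
          have hxt0 : x < t0 := lt_of_le_of_ne (hsx t0 ht0mem) (Ne.symm ht0x)
          intro y hy
          rcases List.mem_cons.mp hy with rfl | hy'
          · exact hxt0
          · have htp : (t0 :: t').Pairwise (· ≤ ·) := ht0 ▸ htt
            exact lt_of_lt_of_le hxt0 ((List.pairwise_cons.mp htp).1 y hy')
      have hsplitc : ∀ v : Int, xs.count v = (xs.takeWhile (fun y => y == x)).count v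
          + (xs.dropWhile (fun y => y == x)).count v := by
        intro v
        have h9 : xs.count v = (xs.takeWhile (fun y => y == x)
            ++ xs.dropWhile (fun y => y == x)).count v := by rw [hxs]
        rw [h9, List.count_append]
      have htcnt : ∀ v ∈ xs.dropWhile (fun y => y == x),
          (x :: xs).count v = (xs.dropWhile (fun y => y == x)).count v := by
        intro v hv
        have hvx : x ≠ v := ne_of_lt (hxt v hv)
        have hr0 : (xs.takeWhile (fun y => y == x)).count v = 0 := by
          rw [List.count_eq_zero]
          intro hvr
          exact hvx (hrx v hvr).symm
        rw [List.count_cons, hsplitc v, hr0]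
        simp [hvx]
      have hcx : (x :: xs).count x = 1 + (xs.takeWhile (fun y => y == x)).length := by
        have h1 : (xs.takeWhile (fun y => y == x)).count x
            = (xs.takeWhile (fun y => y == x)).length := by
          rw [List.count_eq_length]
          intro y hy
          exact (hrx y hy).symm
        have h2 : (xs.dropWhile (fun y => y == x)).count x = 0 :=
          List.count_eq_zero.mpr (fun hx' => lt_irrefl x (hxt x hx'))
        rw [List.count_cons_self, hsplitc x, h1, h2]
        omega
      have hlt : (xs.dropWhile (fun y => y == x)).length ≤ fuel := by
        have h1 := (List.dropWhile_sublist (l := xs) (p := fun y => y == x)).length_le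
        have h2 : xs.length + 1 ≤ fuel + 1 := by simpa using hl
        omega
      have htail : pvCollectGo fuel (xs.dropWhile (fun y => y == x))
          = (xs.dropWhile (fun y => y == x)).filter
              (fun v => decide ((x :: xs).count v = 1) && !(v == 0)) := by
        rw [ih _ hlt htt]
        apply (List.filter_congr ?_).symm
        intro v hv
        rw [htcnt v hv]
      have hxsf : ∀ (P : Int → Bool), xs.filter P = (xs.takeWhile (fun y => y == x)).filter P
          ++ (xs.dropWhile (fun y => y == x)).filter P := by
        intro P
        rw [← List.filter_append, hxs]
      by_cases hre : xs.takeWhile (fun y => y == x) = []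
      · have hxst : xs.dropWhile (fun y => y == x) = xs := by
          rw [hre] at hxs
          simpa using hxs
        have hcx1 : ((x :: xs).count x = 1) := by rw [hcx, hre]; simp
        by_cases hx0 : x = 0
        · simp only [pvCollectGo, if_pos hre, if_pos (show (x == 0) = true by simp [hx0])]
          rw [htail, hxst, List.filter_cons]
          rw [if_neg (by simp [hx0])]
        · simp only [pvCollectGo, if_pos hre, if_neg (show ¬ (x == 0) = true by simp [hx0])]
          rw [htail, hxst, List.filter_cons]
          have hcond : (decide ((x :: xs).count x = 1) && !(x == 0)) = true := by
            rw [hcx1]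
            simp [hx0]
          rw [if_pos hcond]
      · simp only [pvCollectGo, if_neg hre]
        rw [htail]
        have hcxne : ¬ ((x :: xs).count x = 1) := by
          rw [hcx]
          have h3 : 0 < (xs.takeWhile (fun y => y == x)).length := List.length_pos_iff.mpr hre
          omega
        have hrnil : (xs.takeWhile (fun y => y == x)).filter
            (fun v => decide ((x :: xs).count v = 1) && !(v == 0)) = [] := by
          rw [List.filter_eq_nil_iff]
          intro y hy
          rw [hrx y hy]
          intro hcontra
          simp only [Bool.and_eq_true, decide_eq_true_eq] at hcontra
          exact hcxne hcontra.1
        have hcond2 : ¬ ((decide ((x :: xs).count x = 1) && !(x == 0)) = true) := by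
          intro hcontra
          simp only [Bool.and_eq_true, decide_eq_true_eq] at hcontra
          exact hcxne hcontra.1
        rw [List.filter_cons, if_neg hcond2, hxsf, hrnil, List.nil_append]

lemma collect_spec (l : List Int) (h : l.Pairwise (· ≤ ·)) :
    pvCollect l = l.filter (fun v => decide (l.count v = 1) && !(v == 0)) := by
  rw [pvCollect, collectGo_spec l.length l le_rfl h]

-- sorted insert helpers -------------------------------------------------------

lemma ins_perm (S : List Int) (v : Int) :
    (S.takeWhile (fun x => decide (x < v)) ++ v :: S.dropWhile (fun x => decide (x < v))).Perm
      (v :: S) := by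
  have h1 : (S.takeWhile (fun x => decide (x < v)) ++ v :: S.dropWhile (fun x => decide (x < v))).Perm
      (v :: (S.takeWhile (fun x => decide (x < v)) ++ S.dropWhile (fun x => decide (x < v)))) :=
    List.perm_middle
  rw [List.takeWhile_append_dropWhile] at h1
  exact h1

lemma ins_pairwise (S : List Int) (v : Int) (hS : S.Pairwise (· < ·)) (hv : v ∉ S) :
    (S.takeWhile (fun x => decide (x < v)) ++
      v :: S.dropWhile (fun x => decide (x < v))).Pairwise (· < ·) := by
  have hS' : (S.takeWhile (fun x => decide (x < v)) ++
      S.dropWhile (fun x => decide (x < v))).Pairwise (· < ·) := by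
    rw [List.takeWhile_append_dropWhile]; exact hS
  obtain ⟨h1, h2, h3⟩ := List.pairwise_append.mp hS'
  have hvdw : ∀ y ∈ S.dropWhile (fun x => decide (x < v)), v < y := by
    cases hd : S.dropWhile (fun x => decide (x < v)) with
    | nil => simp
    | cons d0 d' =>
      have h0 : decide (d0 < v) = false := dropWhile_head_false hd
      have hd0 : ¬ d0 < v := by simpa using h0
      have hd0mem : d0 ∈ S := (List.dropWhile_sublist _).subset (hd ▸ List.mem_cons_self)
      have hd0v : v < d0 := lt_of_le_of_ne (not_lt.mp hd0) (fun h => hv (h ▸ hd0mem))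
      intro y hy
      rcases List.mem_cons.mp hy with rfl | hy'
      · exact hd0v
      · have hdp : (d0 :: d').Pairwise (· < ·) := hd ▸ h2
        exact hd0v.trans ((List.pairwise_cons.mp hdp).1 y hy')
  apply List.pairwise_append.mpr
  refine ⟨h1, List.pairwise_cons.mpr ⟨hvdw, h2⟩, ?_⟩
  intro a ha b hb
  have hav : a < v := by
    have := List.mem_takeWhile_imp ha
    simpa using this
  rcases List.mem_cons.mp hb with rfl | hb'
  · exact hav
  · exact h3 a ha b hb'

-- the insertion chain ---------------------------------------------------------

lemma chain_nz :
    ∀ (ws S : List Int) (m : Nat),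
      S.Pairwise (· < ·) → (∀ x ∈ S, x ≠ 0) → (∀ w ∈ ws, w ≠ 0) →
      (∀ w ∈ ws, w ∉ S) → ws.Nodup → S.length + ws.length ≤ m →
      ∃ S' : List Int,
        ws.foldl (fun st v => pvPseudoGo st v 0 st.length) (S ++ List.replicate (m - S.length) 0)
            = S' ++ List.replicate (m - S'.length) 0
          ∧ S'.Pairwise (· < ·) ∧ S'.Perm (S ++ ws) ∧ S'.length = S.length + ws.length := by
  intro ws
  induction ws with
  | nil =>
    intro S m h1 _ _ _ _ _
    exact ⟨S, by simp, h1, by simp, by simp⟩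
  | cons w ws' ih =>
    intro S m hS hS0 hws0 hdisj hnd hlen
    have hlen' : S.length + ws'.length + 1 ≤ m := by
      simp only [List.length_cons] at hlen; omega
    have hz1 : 1 ≤ m - S.length := by omega
    have hlist := congrArg List.length
      (List.takeWhile_append_dropWhile (p := fun x => decide (x < w)) (l := S))
    rw [List.length_append] at hlist
    rw [List.foldl_cons]
    have hstl : (S ++ List.replicate (m - S.length) (0:Int)).length
        = S.length + (m - S.length) := by simp
    rw [hstl]
    have hstep := pseudo_spec S [] (m - S.length) w hz1 (fun x hx _ => hS0 x hx)
    simp only [List.nil_append, List.length_nil] at hstep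
    rw [hstep]
    have hlen1 : (S.takeWhile (fun x => decide (x < w)) ++
        w :: S.dropWhile (fun x => decide (x < w))).length = S.length + 1 := by
      rw [List.length_append, List.length_cons]; omega
    have hmm : m - S.length - 1 = m - (S.takeWhile (fun x => decide (x < w)) ++
        w :: S.dropWhile (fun x => decide (x < w))).length := by
      rw [hlen1]; omega
    rw [hmm]
    obtain ⟨S', hfold, hp1, hp2, hp3⟩ := ih
      (S.takeWhile (fun x => decide (x < w)) ++ w :: S.dropWhile (fun x => decide (x < w))) m
      (ins_pairwise S w hS (hdisj w List.mem_cons_self))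
      (fun x hx => by
        rcases List.mem_cons.mp ((ins_perm S w).mem_iff.mp hx) with rfl | hx'
        · exact hws0 x List.mem_cons_self
        · exact hS0 x hx')
      (fun y hy => hws0 y (List.mem_cons_of_mem w hy))
      (fun y hy hymem => by
        rcases List.mem_cons.mp ((ins_perm S w).mem_iff.mp hymem) with rfl | hy'
        · exact (List.nodup_cons.mp hnd).1 hy
        · exact hdisj y (List.mem_cons_of_mem w hy) hy')
      (List.nodup_cons.mp hnd).2
      (by rw [hlen1]; omega)
    refine ⟨S', hfold, hp1, ?_, by simp only [hp3, hlen1, List.length_cons]; omega⟩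
    have h2 : ((w :: S) ++ ws').Perm (S ++ w :: ws') :=
      (List.perm_middle (a := w) (l₁ := S) (l₂ := ws')).symm
    exact hp2.trans (((ins_perm S w).append_right ws').trans h2)

-- putting it together ---------------------------------------------------------

lemma flat_length (T1 : List (List Int)) : (pvFlat T1).length = T1.length * T1.length := by
  unfold pvFlat
  rw [List.length_flatMap]
  have h1 : (T1.map fun row => ((List.range T1.length).map
      (fun j => row.getD j 0)).length) = List.replicate T1.length T1.length := by
    rw [List.eq_replicate_iff]
    constructor
    · simp
    · intro b hb
      rcases List.mem_map.mp hb with ⟨row, _, hrow⟩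
      simpa using hrow.symm
  rw [h1, List.sum_replicate, smul_eq_mul]

lemma vs_facts (T1 : List (List Int)) :
    ((pvFlat T1).filter (fun v => decide ((pvFlat T1).count v = 1))).Nodup ∧
    (∀ v ∈ (pvFlat T1).filter (fun v => decide ((pvFlat T1).count v = 1)),
      (pvFlat T1).count v = 1) := by
  constructor
  · rw [List.nodup_iff_count_le_one]
    intro a
    rw [count_filter_eq]
    split_ifs with h
    · exact le_of_eq (of_decide_eq_true h)
    · exact Nat.zero_le 1
  · intro v hv
    exact of_decide_eq_true ((List.mem_filter.mp hv).2)

lemma filter_count_nz_eq (F : List Int) (h : ∀ v ∈ F, F.count v = 1 → v ≠ 0) :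
    F.filter (fun v => decide (F.count v = 1) && !(v == 0))
      = F.filter (fun v => decide (F.count v = 1)) := by
  apply List.filter_congr
  intro v hv
  by_cases hP : F.count v = 1
  · simp [hP, h v hv hP]
  · simp [hP]

lemma filter_count_split (F F₁ F₂ : List Int) (h : F = F₁ ++ 0 :: F₂) (hc : F.count 0 = 1) :
    F.filter (fun v => decide (F.count v = 1))
      = F₁.filter (fun v => decide (F.count v = 1)) ++
          0 :: F₂.filter (fun v => decide (F.count v = 1)) := by
  have hg := congrArg (List.filter (fun v => decide (F.count v = 1))) h
  rw [hg, List.filter_append, List.filter_cons, if_pos (by simp [hc])]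

lemma filter_countnz_split (F F₁ F₂ : List Int) (h : F = F₁ ++ 0 :: F₂)
    (h1 : (0:Int) ∉ F₁) (h2 : (0:Int) ∉ F₂) :
    F.filter (fun v => decide (F.count v = 1) && !(v == 0))
      = F₁.filter (fun v => decide (F.count v = 1)) ++
          F₂.filter (fun v => decide (F.count v = 1)) := by
  have hg := congrArg (List.filter (fun v => decide (F.count v = 1) && !(v == 0))) h
  rw [hg, List.filter_append, List.filter_cons, if_neg (by simp)]
  congr 1
  · apply List.filter_congr
    intro v hv
    have hv0 : v ≠ 0 := fun he => h1 (he ▸ hv)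
    simp [hv0]
  · apply List.filter_congr
    intro v hv
    have hv0 : v ≠ 0 := fun he => h2 (he ▸ hv)
    simp [hv0]

lemma bside (T1 : List (List Int)) :
    ∃ C : List Int,
      zad6_alt T1 = C ++ List.replicate (T1.length * T1.length - C.length) 0
        ∧ C.Pairwise (· ≤ ·)
        ∧ C.Perm ((pvFlat T1).filter
            (fun v => decide ((pvFlat T1).count v = 1) && !(v == 0))) := by
  have hsp : (PySem.List.sorted (pvFlat T1) (fun x => x) false).Pairwise (· ≤ ·) := by
    simpa using PySem.List.sorted_pairwise (xs := pvFlat T1) (key := fun x => x)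
  have hperm : (PySem.List.sorted (pvFlat T1) (fun x => x) false).Perm (pvFlat T1) :=
    PySem.List.sorted_perm (pvFlat T1) (fun x => x) false
  refine ⟨pvCollect (PySem.List.sorted (pvFlat T1) (fun x => x) false), rfl, ?_, ?_⟩
  · rw [collect_spec _ hsp]
    exact hsp.filter _
  · rw [collect_spec _ hsp]
    have hcong : (PySem.List.sorted (pvFlat T1) (fun x => x) false).filter
          (fun v => decide ((PySem.List.sorted (pvFlat T1) (fun x => x) false).count v = 1)
            && !(v == 0))
        = (PySem.List.sorted (pvFlat T1) (fun x => x) false).filter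
          (fun v => decide ((pvFlat T1).count v = 1) && !(v == 0)) := by
      apply List.filter_congr
      intro v hv
      rw [hperm.count_eq]
    rw [hcong]
    exact hperm.filter _

lemma main_eq (T1 : List (List Int)) (hD : ¬ D_zad6 T1) : zad6 T1 = zad6_alt T1 := by
  obtain ⟨hnd, hv1⟩ := vs_facts T1
  obtain ⟨C, hB, hCs, hCp⟩ := bside T1
  have hFlen := flat_length T1
  have hvslen : ((pvFlat T1).filter (fun v => decide ((pvFlat T1).count v = 1))).length
      ≤ T1.length * T1.length := by
    rw [← hFlen]; exact List.length_filter_le _ _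
  rw [zad6_eq_chain T1, hB]
  have hfin : ∀ S' : List Int, S'.Pairwise (· < ·) →
      S'.Perm ((pvFlat T1).filter (fun v => decide ((pvFlat T1).count v = 1) && !(v == 0))) →
      S' ++ List.replicate (T1.length * T1.length - S'.length) 0
        = C ++ List.replicate (T1.length * T1.length - C.length) 0 := by
    intro S' hp hperm
    have hs1 : S'.Pairwise (· ≤ ·) := hp.imp (fun h => le_of_lt h)
    have hSC : S' = C := (hperm.trans hCp.symm).eq_of_pairwise
      (fun a b _ _ hab hba => le_antisymm hab hba) hs1 hCs
    rw [hSC]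
  have hinit : List.replicate (T1.length * T1.length) (0:Int)
      = [] ++ List.replicate (T1.length * T1.length - ([]:List Int).length) 0 := by simp
  by_cases h0 : (0:Int) ∈ (pvFlat T1).filter (fun v => decide ((pvFlat T1).count v = 1))
  · -- zero is a singleton; by ¬D no positive singleton precedes it
    have hc0 : (pvFlat T1).count 0 = 1 := hv1 0 h0
    have h0F : (0:Int) ∈ pvFlat T1 := (List.mem_filter.mp h0).1
    have hklt : (pvFlat T1).idxOf 0 < (pvFlat T1).length := List.idxOf_lt_length_of_mem h0F
    have hdk : (pvFlat T1).drop ((pvFlat T1).idxOf 0)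
        = 0 :: (pvFlat T1).drop ((pvFlat T1).idxOf 0 + 1) := by
      rw [List.drop_eq_getElem_cons hklt, List.getElem_idxOf hklt]
    have hsplit : pvFlat T1 = (pvFlat T1).take ((pvFlat T1).idxOf 0)
        ++ 0 :: (pvFlat T1).drop ((pvFlat T1).idxOf 0 + 1) := by
      conv_lhs => rw [← List.take_append_drop ((pvFlat T1).idxOf 0) (pvFlat T1)]
      rw [hdk]
    have h01 : (0:Int) ∉ (pvFlat T1).take ((pvFlat T1).idxOf 0) := not_mem_take_idxOf _ 0
    have h02 : (0:Int) ∉ (pvFlat T1).drop ((pvFlat T1).idxOf 0 + 1) := by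
      intro hm
      have hcc := congrArg (fun l => List.count 0 l) hsplit
      simp only [List.count_append, List.count_cons_self] at hcc
      have hpos := List.one_le_count_iff.mpr hm
      omega
    have hDneg : ∀ v ∈ (pvFlat T1).take ((pvFlat T1).idxOf 0),
        ¬(0 < v ∧ (pvFlat T1).count v = 1) := by
      intro v hv hvc
      exact hD ⟨hc0, v, hv, hvc⟩
    have hvsplit := filter_count_split (pvFlat T1) _ _ hsplit hc0
    have hpneg : ∀ x ∈ ((pvFlat T1).take ((pvFlat T1).idxOf 0)).filter
        (fun v => decide ((pvFlat T1).count v = 1)), x < 0 := by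
      intro x hx
      have hxF : x ∈ (pvFlat T1).take ((pvFlat T1).idxOf 0) := (List.mem_filter.mp hx).1
      have hxc : (pvFlat T1).count x = 1 := of_decide_eq_true ((List.mem_filter.mp hx).2)
      have hx0 : x ≠ 0 := fun h => h01 (h ▸ hxF)
      have hnp : ¬ 0 < x := fun hpos => hDneg x hxF ⟨hpos, hxc⟩
      omega
    have hndv := hnd
    rw [hvsplit] at hndv
    rcases List.nodup_append.mp hndv with ⟨hndp, hndq', hdisj⟩
    rcases List.nodup_cons.mp hndq' with ⟨h0q, hndq⟩
    have hlpq : (((pvFlat T1).take ((pvFlat T1).idxOf 0)).filter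
          (fun v => decide ((pvFlat T1).count v = 1))).length
        + 1 + (((pvFlat T1).drop ((pvFlat T1).idxOf 0 + 1)).filter
          (fun v => decide ((pvFlat T1).count v = 1))).length
        = ((pvFlat T1).filter (fun v => decide ((pvFlat T1).count v = 1))).length := by
      rw [hvsplit]; simp; omega
    rw [hvsplit, List.foldl_append, List.foldl_cons]
    rw [hinit]
    obtain ⟨S₁, hf1, hpw1, hperm1, hl1⟩ := chain_nz
      (((pvFlat T1).take ((pvFlat T1).idxOf 0)).filter
        (fun v => decide ((pvFlat T1).count v = 1))) [] (T1.length * T1.length)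
      List.Pairwise.nil (by simp)
      (fun x hx => ne_of_lt (hpneg x hx)) (by simp) hndp (by simp; omega)
    rw [hf1]
    have hS1neg : ∀ x ∈ S₁, x < 0 := fun x hx =>
      hpneg x (by simpa using hperm1.mem_iff.mp hx)
    have hl1' : S₁.length = (((pvFlat T1).take ((pvFlat T1).idxOf 0)).filter
        (fun v => decide ((pvFlat T1).count v = 1))).length := by simpa using hl1
    have hz : 1 ≤ T1.length * T1.length - S₁.length := by omega
    have hstl : (S₁ ++ List.replicate (T1.length * T1.length - S₁.length) (0:Int)).length
        = S₁.length + (T1.length * T1.length - S₁.length) := by simp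
    rw [hstl]
    have hstep := pseudo_spec S₁ [] (T1.length * T1.length - S₁.length) 0 hz
      (fun x hx _ => ne_of_lt (hS1neg x hx))
    simp only [List.nil_append, List.length_nil] at hstep
    rw [hstep]
    have htw : S₁.takeWhile (fun x => decide (x < 0)) = S₁ :=
      List.takeWhile_eq_self_iff.mpr (fun x hx => by simpa using hS1neg x hx)
    have hdw : S₁.dropWhile (fun x => decide (x < 0)) = [] :=
      List.dropWhile_eq_nil_iff.mpr (fun x hx => by simpa using hS1neg x hx)
    rw [htw, hdw]
    have hfix : S₁ ++ [(0:Int)] ++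
          List.replicate (T1.length * T1.length - S₁.length - 1) 0
        = S₁ ++ List.replicate (T1.length * T1.length - S₁.length) 0 := by
      rw [List.append_assoc, List.singleton_append, ← List.replicate_succ]
      congr 2
      omega
    rw [hfix]
    obtain ⟨S', hf2, hp2, hperm2, hl2⟩ := chain_nz
      (((pvFlat T1).drop ((pvFlat T1).idxOf 0 + 1)).filter
        (fun v => decide ((pvFlat T1).count v = 1))) S₁ (T1.length * T1.length)
      hpw1
      (fun x hx => ne_of_lt (hS1neg x hx))
      (fun x hx h => h0q (h ▸ hx))
      (fun y hy hymem => by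
        have hyp : y ∈ ((pvFlat T1).take ((pvFlat T1).idxOf 0)).filter
            (fun v => decide ((pvFlat T1).count v = 1)) := by
          have h9 := hperm1.mem_iff.mp hymem
          rwa [List.nil_append] at h9
        exact absurd rfl (hdisj _ hyp _ (List.mem_cons_of_mem _ hy)))
      hndq
      (by rw [hl1']; omega)
    rw [hf2]
    apply hfin S' hp2
    have htarget := filter_countnz_split (pvFlat T1) _ _ hsplit h01 h02
    rw [htarget]
    exact hperm2.trans ((hperm1.append_right _).trans (List.Perm.of_eq (by simp)))
  · -- no zero singleton
    have hvs0 : ∀ w ∈ (pvFlat T1).filter (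
        fun v => decide ((pvFlat T1).count v = 1)), w ≠ 0 :=
      fun w hw heq => h0 (heq ▸ hw)
    rw [hinit]
    obtain ⟨S', hf, hp, hperm, _⟩ := chain_nz
      ((pvFlat T1).filter (fun v => decide ((pvFlat T1).count v = 1))) []
      (T1.length * T1.length) List.Pairwise.nil (by simp) hvs0 (by simp) hnd
      (by simpa using hvslen)
    rw [hf]
    apply hfin S' hp
    have hgoal : (pvFlat T1).filter (fun v => decide ((pvFlat T1).count v = 1) && !(v == 0))
        = (pvFlat T1).filter (fun v => decide ((pvFlat T1).count v = 1)) :=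
      filter_count_nz_eq _ (fun v hv hc => hvs0 v (List.mem_filter.mpr
        ⟨hv, decide_eq_true hc⟩))
    rw [hgoal]
    simpa using hperm

-- ===== VERDICT (by name: the statement is the Claim_ definition above) =====
theorem zad6_spec : Claim_unchanged_zad6 := by
  intro T1 _ _ hD
  exact main_eq T1 hD

theorem zad6_changed : Claim_changed_zad6 := by
  unfold Claim_changed_zad6; decide
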